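-- pv_equiv track=rewrite | github.com/jancaaa/advent-of-code2021 | day10/day10.py | part1
-- ===== SOURCE A (Python) =====
-- def remove_valid(line: str) -> str:
--     removed = True
--     while removed:
--         new_line = line.replace("()", "")
--         new_line = new_line.replace("[]", "")
--         new_line = new_line.replace("{}", "")
--         new_line = new_line.replace("<>", "")
--         if line == new_line:
--             removed = False
--         else:
--             line = new_line
--     return line
--
-- def part1(entries: list) -> int:
--     sum = 0
--     for e in entries:
--         e = remove_valid(e)
--         for i in e:
--             if i == ")":
--                 sum += 3
--                 break
--             elif i == "]":
--                 sum += 57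
--                 break
--             elif i == "}":
--                 sum += 1197
--                 break
--             elif i == ">":
--                 sum += 25137
--                 break
--     return sum
-- ===== SOURCE B (Python) =====
-- def part1(entries: list) -> int:
--     pairs = {")": "(", "]": "[", "}": "{", ">": "<"}
--     scores = {")": 3, "]": 57, "}": 1197, ">": 25137}
--     total = 0
--     for e in entries:
--         stack = []
--         for ch in e:
--             if ch in pairs:
--                 if stack and stack[-1] == pairs[ch]:
--                     stack.pop()
--                 else:
--                     total += scores[ch]
--                     break
--             else:
--                 stack.append(ch)
--     return total
-- ===== Notes on version B (the rewrite author's own statement) =====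
-- stated objective: faster
-- what changed: Replaced the per-line repeat-until-fixpoint chain of str.replace calls with a single-pass stack scan that scores the first closing bracket whose stack top does not match.
import Mathlib
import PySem

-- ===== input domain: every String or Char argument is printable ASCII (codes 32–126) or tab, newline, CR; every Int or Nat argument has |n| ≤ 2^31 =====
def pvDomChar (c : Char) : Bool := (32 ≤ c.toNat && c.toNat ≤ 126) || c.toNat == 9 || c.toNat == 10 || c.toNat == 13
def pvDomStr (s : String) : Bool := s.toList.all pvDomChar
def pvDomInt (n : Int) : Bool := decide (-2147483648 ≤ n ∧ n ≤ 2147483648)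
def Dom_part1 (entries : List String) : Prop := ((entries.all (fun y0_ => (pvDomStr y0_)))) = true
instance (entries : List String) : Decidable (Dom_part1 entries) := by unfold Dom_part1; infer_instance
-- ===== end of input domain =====

-- B replaces A's per-line repeat-until-fixpoint chain of replace("()","") … calls with a
-- single-pass stack scan (objective: faster, O(n) per line instead of O(n^2)).

-- ===== PORT A =====
-- helper for A's termination proof only: Python's s.replace(oc, "") for a two-char
-- pattern removes left-to-right non-overlapping occurrences, i.e. this recursion.
def removePairs (o c : Char) : List Char → List Char
  | [] => []
  | [a] => [a]
  | a :: b :: t => if a = o ∧ b = c then removePairs o c t else a :: removePairs o c (b :: t)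

theorem replace_pair_go (o c : Char) : ∀ (fuel : Nat) (l acc : List Char), l.length ≤ fuel →
    PySem.Chars.replace.go [o, c] [] fuel l acc = acc.reverse ++ removePairs o c l := by
  intro fuel
  induction fuel with
  | zero =>
    intro l acc h
    interval_cases hl : l.length
    · simp at hl; subst hl; simp [PySem.Chars.replace.go, removePairs]
  | succ n ih =>
    intro l acc h
    match l with
    | [] => simp [PySem.Chars.replace.go, removePairs]
    | [a] =>
      have hpre : [o, c].isPrefixOf [a] = false := by
        simp [List.isPrefixOf]
      simp [PySem.Chars.replace.go, hpre, removePairs]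
      rw [ih [] (a :: acc) (by simp)]
      simp [removePairs]
    | a :: b :: t =>
      by_cases hab : a = o ∧ b = c
      · obtain ⟨rfl, rfl⟩ := hab
        have hpre : [a, b].isPrefixOf (a :: b :: t) = true := by
          simp [List.isPrefixOf]
        simp only [PySem.Chars.replace.go, hpre]
        rw [show List.drop [a,b].length (a :: b :: t) = t by simp]
        rw [ih t _ (by simp at h ⊢; omega)]
        simp [removePairs]
      · have hpre : [o, c].isPrefixOf (a :: b :: t) = false := by
          simp [List.isPrefixOf]
          intro ho hc; exact hab ⟨ho.symm, hc.symm⟩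
        simp only [PySem.Chars.replace.go, hpre, Bool.false_eq_true, if_false]
        rw [ih (b :: t) (a :: acc) (by simp at h ⊢; omega)]
        simp [removePairs, hab]

theorem replace_pair_eq (o c : Char) (l : List Char) :
    PySem.Chars.replace l [o, c] [] = removePairs o c l := by
  simp only [PySem.Chars.replace]
  rw [if_neg (by simp)]
  rw [replace_pair_go o c l.length l [] (le_refl _)]
  simp

theorem removePairs_eq_or_lt (o c : Char) (l : List Char) :
    removePairs o c l = l ∨ (removePairs o c l).length < l.length := by
  fun_induction removePairs o c l with
  | case1 => left; rfl
  | case2 a => left; rfl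
  | case3 a b t h ih =>
    right
    rcases ih with h' | h' <;> simp [h'] <;> omega
  | case4 a b t h ih =>
    rcases ih with h' | h'
    · left; simp [h']
    · right; simp at h' ⊢; omega

theorem removePairs_length_le (o c : Char) (l : List Char) :
    (removePairs o c l).length ≤ l.length := by
  rcases removePairs_eq_or_lt o c l with h | h
  · simp [h]
  · omega

theorem r4_lt (line : List Char)
    (hne : ¬ line = removePairs '<' '>' (removePairs '{' '}' (removePairs '[' ']' (removePairs '(' ')' line)))) :
    (removePairs '<' '>' (removePairs '{' '}' (removePairs '[' ']' (removePairs '(' ')' line)))).length < line.length := by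
  have L2 := removePairs_length_le '[' ']' (removePairs '(' ')' line)
  have L3 := removePairs_length_le '{' '}' (removePairs '[' ']' (removePairs '(' ')' line))
  have L4 := removePairs_length_le '<' '>' (removePairs '{' '}' (removePairs '[' ']' (removePairs '(' ')' line)))
  rcases removePairs_eq_or_lt '(' ')' line with h1 | h1
  · rw [h1] at L2 L3 L4 ⊢
    rcases removePairs_eq_or_lt '[' ']' line with h2 | h2
    · rw [h2] at L3 L4 ⊢
      rcases removePairs_eq_or_lt '{' '}' line with h3 | h3
      · rw [h3] at L4 ⊢
        rcases removePairs_eq_or_lt '<' '>' line with h4 | h4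
        · exact absurd (by rw [h1, h2, h3, h4]) hne
        · exact h4
      · omega
    · omega
  · omega

-- literal port of A's remove_valid: the while loop re-runs the four replaces until nothing changes
def removeValidA (line : List Char) : List Char :=
  let newLine := PySem.Chars.replace (PySem.Chars.replace (PySem.Chars.replace
      (PySem.Chars.replace line ['(', ')'] []) ['[', ']'] []) ['{', '}'] []) ['<', '>'] []
  if line = newLine then line else removeValidA newLine
termination_by line.length
decreasing_by
  rename_i hne
  simp only [newLine, replace_pair_eq] at hne ⊢
  exact r4_lt line hne

-- literal port of A's inner for-loop with break: first scoring bracket wins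
def firstScoreA : List Char → Int
  | [] => 0
  | i :: rest =>
    if i = ')' then 3
    else if i = ']' then 57
    else if i = '}' then 1197
    else if i = '>' then 25137
    else firstScoreA rest

def part1 (entries : List String) : Int :=
  entries.foldl (fun sum e => sum + firstScoreA (removeValidA e.toList)) 0

-- ===== PORT B =====
def isCloser (c : Char) : Bool := c = ')' || c = ']' || c = '}' || c = '>'

-- pairs / scores dict lookups of Source B
def openerOf (c : Char) : Char :=
  if c = ')' then '(' else if c = ']' then '[' else if c = '}' then '{' else '<'

def scoreOf (c : Char) : Int :=
  if c = ')' then 3 else if c = ']' then 57 else if c = '}' then 1197 else 25137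

-- Source B's inner loop: one pass with an explicit stack, break on first mismatching closer
def scanB (st : List Char) : List Char → Int
  | [] => 0
  | ch :: t =>
    if isCloser ch then
      match st with
      | a :: r => if a = openerOf ch then scanB r t else scoreOf ch
      | [] => scoreOf ch
    else scanB (ch :: st) t

def part1_alt (entries : List String) : Int :=
  entries.foldl (fun total e => total + scanB [] e.toList) 0

-- ===== PRECONDITION & SPEC =====
def Spec_part1 (entries : List String) (out : Int) : Prop := out = part1_alt entries
instance (entries : List String) (out : Int) : Decidable (Spec_part1 entries out) := by unfold Spec_part1; infer_instance

-- ===== CLAIM (what is proved, stated in full; the proofs are below) =====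
def Claim_equal_part1 : Prop := ∀ (entries : List String), Dom_part1 entries → Spec_part1 entries (part1 entries)

-- ===== LEMMAS AND PROOFS =====

-- the one-char transition of B's stack scan, run to completion (proof-only device)
def step (st : List Char) (ch : Char) : List Char :=
  if isCloser ch then
    match st with
    | a :: r => if a = openerOf ch then r else ch :: st
    | [] => ch :: st
  else ch :: st

theorem openerOf_not_closer (c : Char) (h : isCloser c = true) : isCloser (openerOf c) = false := by
  simp only [isCloser, Bool.or_eq_true, decide_eq_true_eq] at h
  rcases h with ((h | h) | h) | h <;> subst h <;> decide

theorem closer_ne_openerOf (c d : Char) (hc : isCloser c = true) (hd : isCloser d = true) :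
    c ≠ openerOf d := by
  intro h
  rw [h, openerOf_not_closer d hd] at hc
  exact Bool.false_ne_true hc

theorem foldl_step_removePairs (o c : Char) (hc : isCloser c = true) (ho : openerOf c = o)
    (hno : isCloser o = false) (l st : List Char) :
    List.foldl step st (removePairs o c l) = List.foldl step st l := by
  fun_induction removePairs o c l generalizing st with
  | case1 => rfl
  | case2 a => rfl
  | case3 a b t h ih =>
    obtain ⟨rfl, rfl⟩ := h
    have h1 : step st a = a :: st := by simp [step, hno]
    have h2 : step (a :: st) b = st := by simp [step, hc, ho]
    simp only [List.foldl_cons, h1, h2, ih]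
  | case4 a b t h ih =>
    simp only [List.foldl_cons, ih]

theorem removeValidA_foldl (l : List Char) :
    List.foldl step [] (removeValidA l) = List.foldl step [] l := by
  fun_induction removeValidA l with
  | case1 line newLine heq => rfl
  | case2 line newLine heq ih =>
    rw [ih]
    simp only [newLine, replace_pair_eq]
    rw [foldl_step_removePairs '<' '>' rfl rfl rfl,
        foldl_step_removePairs '{' '}' rfl rfl rfl,
        foldl_step_removePairs '[' ']' rfl rfl rfl,
        foldl_step_removePairs '(' ')' rfl rfl rfl]

theorem removeValidA_fix (l : List Char) :
    removePairs '<' '>' (removePairs '{' '}' (removePairs '[' ']'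
      (removePairs '(' ')' (removeValidA l)))) = removeValidA l := by
  fun_induction removeValidA l with
  | case1 line newLine heq =>
    simp only [newLine, replace_pair_eq] at heq
    exact heq.symm
  | case2 line newLine heq ih => exact ih

theorem r4_fix_each (l : List Char)
    (h : removePairs '<' '>' (removePairs '{' '}' (removePairs '[' ']' (removePairs '(' ')' l))) = l) :
    removePairs '(' ')' l = l ∧ removePairs '[' ']' l = l ∧
    removePairs '{' '}' l = l ∧ removePairs '<' '>' l = l := by
  have h1 : removePairs '(' ')' l = l := by
    rcases removePairs_eq_or_lt '(' ')' l with h1 | h1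
    · exact h1
    · exfalso
      have := removePairs_length_le '[' ']' (removePairs '(' ')' l)
      have := removePairs_length_le '{' '}' (removePairs '[' ']' (removePairs '(' ')' l))
      have := removePairs_length_le '<' '>' (removePairs '{' '}' (removePairs '[' ']' (removePairs '(' ')' l)))
      have hl := congrArg List.length h
      simp only [List.length] at hl
      omega
  rw [h1] at h
  have h2 : removePairs '[' ']' l = l := by
    rcases removePairs_eq_or_lt '[' ']' l with h2 | h2
    · exact h2
    · exfalso
      have := removePairs_length_le '{' '}' (removePairs '[' ']' l)
      have := removePairs_length_le '<' '>' (removePairs '{' '}' (removePairs '[' ']' l))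
      have hl := congrArg List.length h
      omega
  rw [h2] at h
  have h3 : removePairs '{' '}' l = l := by
    rcases removePairs_eq_or_lt '{' '}' l with h3 | h3
    · exact h3
    · exfalso
      have := removePairs_length_le '<' '>' (removePairs '{' '}' l)
      have hl := congrArg List.length h
      omega
  rw [h3] at h
  exact ⟨h1, h2, h3, h⟩

theorem removePairs_fix_chain (o c : Char) (l : List Char) (h : removePairs o c l = l) :
    l.IsChain (fun a b => ¬(a = o ∧ b = c)) := by
  fun_induction removePairs o c l with
  | case1 => exact List.isChain_nil
  | case2 a => exact List.isChain_singleton a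
  | case3 a b t hab ih =>
    exfalso
    have := removePairs_length_le o c t
    have hl := congrArg List.length h
    simp only [List.length_cons] at hl
    omega
  | case4 a b t hab ih =>
    rw [List.cons_eq_cons] at h
    rw [List.isChain_cons_cons]
    exact ⟨hab, ih h.2⟩

-- the combined irreducibility predicate: no closer directly follows its opener
theorem chains_combine (l : List Char)
    (h1 : l.IsChain (fun a b => ¬(a = '(' ∧ b = ')')))
    (h2 : l.IsChain (fun a b => ¬(a = '[' ∧ b = ']')))
    (h3 : l.IsChain (fun a b => ¬(a = '{' ∧ b = '}')))
    (h4 : l.IsChain (fun a b => ¬(a = '<' ∧ b = '>'))) :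
    l.IsChain (fun a b => isCloser b = true → a ≠ openerOf b) := by
  rw [List.isChain_iff_getElem] at h1 h2 h3 h4 ⊢
  intro i hi
  have g1 := h1 i hi; have g2 := h2 i hi; have g3 := h3 i hi; have g4 := h4 i hi
  intro hb hab
  simp only [isCloser, Bool.or_eq_true, decide_eq_true_eq] at hb
  rcases hb with ((hb | hb) | hb) | hb <;>
    simp only [openerOf, hb] at hab <;> simp_all

theorem irreducible_fold (l : List Char)
    (hch : l.IsChain (fun a b => isCloser b = true → a ≠ openerOf b)) :
    ∀ st : List Char,
      (∀ b, l.head? = some b → isCloser b = true → ∀ a, st.head? = some a → a ≠ openerOf b) →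
      List.foldl step st l = l.reverse ++ st := by
  induction l with
  | nil => intro st _; simp
  | cons ch t ih =>
    intro st hst
    have hpush : step st ch = ch :: st := by
      unfold step
      by_cases hc : isCloser ch
      · rw [if_pos hc]
        match st with
        | [] => rfl
        | a :: r =>
          show (if a = openerOf ch then r else ch :: a :: r) = ch :: a :: r
          rw [if_neg (hst ch rfl hc a rfl)]
      · rw [if_neg hc]
    rw [List.foldl_cons, hpush]
    rw [List.isChain_cons] at hch
    rw [ih hch.2 (ch :: st) (fun b hb hcb a ha => by
      simp only [List.head?_cons, Option.some_inj] at ha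
      subst ha
      exact hch.1 b hb hcb)]
    simp

theorem firstScoreA_no_closer (l : List Char) (h : ∀ x ∈ l, isCloser x = false) :
    firstScoreA l = 0 := by
  induction l with
  | nil => rfl
  | cons a t ih =>
    have ha := h a (by simp)
    simp only [isCloser, Bool.or_eq_false_iff, decide_eq_false_iff_not] at ha
    unfold firstScoreA
    rw [if_neg ha.1.1.1, if_neg ha.1.1.2, if_neg ha.1.2, if_neg ha.2]
    exact ih (fun x hx => h x (by simp [hx]))

theorem firstScoreA_closer (c : Char) (hc : isCloser c = true) (ys : List Char) :
    firstScoreA (c :: ys) = scoreOf c := by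
  simp only [isCloser, Bool.or_eq_true, decide_eq_true_eq] at hc
  rcases hc with ((h | h) | h) | h <;> subst h <;> simp [firstScoreA, scoreOf]

theorem firstScoreA_append_closer (xs : List Char) (c : Char) (ys : List Char)
    (hxs : ∀ x ∈ xs, isCloser x = false) (hc : isCloser c = true) :
    firstScoreA (xs ++ c :: ys) = scoreOf c := by
  induction xs with
  | nil => exact firstScoreA_closer c hc ys
  | cons a t ih =>
    have ha := hxs a (by simp)
    simp only [isCloser, Bool.or_eq_false_iff, decide_eq_false_iff_not] at ha
    rw [List.cons_append]
    unfold firstScoreA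
    rw [if_neg ha.1.1.1, if_neg ha.1.1.2, if_neg ha.1.2, if_neg ha.2]
    exact ih (fun x hx => hxs x (by simp [hx]))

theorem foldl_step_suffix (c : Char) (hc : isCloser c = true) :
    ∀ (t : List Char) (u st : List Char),
      ∃ w, List.foldl step (u ++ c :: st) t = w ++ c :: st := by
  intro t
  induction t with
  | nil => intro u st; exact ⟨u, rfl⟩
  | cons d t' ih =>
    intro u st
    rw [List.foldl_cons]
    by_cases hd : isCloser d
    · match u with
      | [] =>
        have : step ([] ++ c :: st) d = [d] ++ c :: st := by
          simp only [List.nil_append, step, hd, if_pos]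
          rw [if_neg (closer_ne_openerOf c d hc hd)]
          rfl
        rw [this]; exact ih [d] st
      | a :: u' =>
        by_cases ha : a = openerOf d
        · have : step ((a :: u') ++ c :: st) d = u' ++ c :: st := by
            simp [step, hd, ha]
          rw [this]; exact ih u' st
        · have : step ((a :: u') ++ c :: st) d = (d :: a :: u') ++ c :: st := by
            simp [step, hd, ha]
          rw [this]; exact ih (d :: a :: u') st
    · have : step (u ++ c :: st) d = (d :: u) ++ c :: st := by
        simp [step, hd]
      rw [this]; exact ih (d :: u) st

theorem scanB_eq_foldl (l : List Char) :
    ∀ st : List Char, (∀ x ∈ st, isCloser x = false) →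
      scanB st l = firstScoreA (List.foldl step st l).reverse := by
  induction l with
  | nil =>
    intro st hst
    simp only [List.foldl_nil]
    exact (firstScoreA_no_closer st.reverse (fun x hx => hst x (List.mem_reverse.mp hx))).symm
  | cons ch t ih =>
    intro st hst
    by_cases hc : isCloser ch
    · match st with
      | [] =>
        have hs : scanB [] (ch :: t) = scoreOf ch := by simp [scanB, hc]
        have hstep : step [] ch = ch :: [] := by simp [step, hc]
        rw [hs, List.foldl_cons, hstep]
        obtain ⟨w, hw⟩ := foldl_step_suffix ch hc t [] []
        rw [show (ch :: []) = [] ++ ch :: [] from rfl, hw]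
        rw [List.reverse_append, List.reverse_cons]
        simp only [List.append_assoc]
        exact (firstScoreA_append_closer [] ch w.reverse (by simp) hc).symm
      | a :: r =>
        by_cases ha : a = openerOf ch
        · have hs : scanB (a :: r) (ch :: t) = scanB r t := by simp [scanB, hc, ha]
          have hstep : step (a :: r) ch = r := by simp [step, hc, ha]
          rw [hs, List.foldl_cons, hstep]
          exact ih r (fun x hx => hst x (by simp [hx]))
        · have hs : scanB (a :: r) (ch :: t) = scoreOf ch := by simp [scanB, hc, ha]
          have hstep : step (a :: r) ch = ch :: a :: r := by simp [step, hc, ha]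
          rw [hs, List.foldl_cons, hstep]
          obtain ⟨w, hw⟩ := foldl_step_suffix ch hc t [] (a :: r)
          rw [show (ch :: a :: r) = [] ++ ch :: (a :: r) from rfl, hw]
          rw [List.reverse_append, List.reverse_cons]
          simp only [List.append_assoc]
          exact (firstScoreA_append_closer (a :: r).reverse ch w.reverse
            (fun x hx => hst x (List.mem_reverse.mp hx)) hc).symm
    · have hs : scanB st (ch :: t) = scanB (ch :: st) t := by
        simp [scanB, hc]
      have hstep : step st ch = ch :: st := by simp [step, hc]
      rw [hs, List.foldl_cons, hstep]
      exact ih (ch :: st) (fun x hx => by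
        rcases List.mem_cons.mp hx with rfl | hx
        · exact Bool.of_not_eq_true hc
        · exact hst x hx)

theorem per_line (l : List Char) : firstScoreA (removeValidA l) = scanB [] l := by
  have hfix := r4_fix_each (removeValidA l) (removeValidA_fix l)
  have hch := chains_combine (removeValidA l)
    (removePairs_fix_chain _ _ _ hfix.1) (removePairs_fix_chain _ _ _ hfix.2.1)
    (removePairs_fix_chain _ _ _ hfix.2.2.1) (removePairs_fix_chain _ _ _ hfix.2.2.2)
  have hirr := irreducible_fold (removeValidA l) hch [] (by intro b hb hcb a ha; simp at ha)
  rw [scanB_eq_foldl l [] (by simp)]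
  rw [← removeValidA_foldl l, hirr]
  simp

theorem part1_spec : Claim_equal_part1 := by
  intro entries _
  unfold Spec_part1 part1 part1_alt
  induction entries using List.reverseRecOn with
  | nil => rfl
  | append_singleton xs x ih => simp [List.foldl_append, per_line]
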